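-- pv_equiv track=rewrite | github.com/eisenhans/AIND-Sudoku | solution.py | find_twins
-- ===== SOURCE A (Python) =====
-- def find_twins(unit, values):
--     twins = []
--     remaining = unit.copy()
--     while len(remaining) > 1:
--         box = remaining.pop(0)
--         if len(values[box]) == 2:
--             twins_of_box = [t for t in remaining if values[t] == values[box]]
--             if twins_of_box:
--                 twins.append((box, twins_of_box[0]))
--
--     return twins
-- ===== SOURCE B (Python) =====
-- def find_twins(unit, values):
--     # one backward pass builds value -> nearest-later box; then emit (box, successor) in unit order
--     nxt = {}
--     succ = []
--     for box in reversed(unit):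
--         v = values[box]
--         if len(v) == 2:
--             succ.append((box, nxt.get(v)))
--             nxt[v] = box
--         else:
--             succ.append((box, None))
--     succ.reverse()
--     return [(box, s) for box, s in succ if s is not None]
-- ===== Notes on version B (the rewrite author's own statement) =====
-- stated objective: alternative
-- what changed: Replaces A's quadratic pop-and-rescan loop (for each twin box, scan all remaining boxes) with one backward pass maintaining a dict from 2-candidate value to the nearest later box, then a single forward emission pass.
-- outside the precondition, e.g. on find_twins(['a', 'b'], {'a': '1'}): A returns [], B raises KeyError
import Mathlib
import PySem

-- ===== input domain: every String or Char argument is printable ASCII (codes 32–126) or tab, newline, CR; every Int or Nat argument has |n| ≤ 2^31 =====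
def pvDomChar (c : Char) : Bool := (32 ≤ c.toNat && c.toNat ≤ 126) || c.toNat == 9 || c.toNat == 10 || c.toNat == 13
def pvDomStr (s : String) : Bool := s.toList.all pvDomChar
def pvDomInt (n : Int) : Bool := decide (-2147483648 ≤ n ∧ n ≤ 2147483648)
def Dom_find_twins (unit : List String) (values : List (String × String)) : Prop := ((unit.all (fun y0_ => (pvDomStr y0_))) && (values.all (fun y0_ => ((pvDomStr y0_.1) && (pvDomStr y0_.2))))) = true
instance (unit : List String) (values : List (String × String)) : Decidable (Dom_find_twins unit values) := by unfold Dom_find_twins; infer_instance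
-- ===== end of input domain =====

-- B replaces A's quadratic pop-and-rescan loop by one backward pass building a
-- value → nearest-later-box dict plus one forward emission pass (objective: alternative algorithm).

-- ===== PORT A =====
-- while len(remaining) > 1: box = remaining.pop(0); … — structural recursion on `remaining`
def findTwinsGo (d : PySem.Dict String String) : List String → List (String × String)
  | [] => []
  | [_] => []
  | box :: rest =>
    let v := d.getD box ""
    if PySem.Str.len v = 2 then
      match rest.filter (fun t => d.getD t "" == v) with
      | [] => findTwinsGo d rest
      | t :: _ => (box, t) :: findTwinsGo d rest
    else findTwinsGo d rest

def find_twins (unit : List String) (values : List (String × String)) : List (String × String) :=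
  findTwinsGo (PySem.Dict.mk values) unit

-- ===== PORT B =====
-- the backward pass of Source B (reversed(unit) + append + final reverse ≡ foldr): state = (nxt dict, succ list)
def altFold (d : PySem.Dict String String) (l : List String) :
    PySem.Dict String String × List (String × Option String) :=
  l.foldr
    (fun box acc =>
      let v := d.getD box ""
      if PySem.Str.len v = 2 then
        (acc.1.insert v box, (box, acc.1.get? v) :: acc.2)
      else (acc.1, (box, none) :: acc.2))
    (PySem.Dict.empty, [])

def find_twins_alt (unit : List String) (values : List (String × String)) : List (String × String) :=
  let d := PySem.Dict.mk values
  (altFold d unit).2.filterMap (fun p => p.2.map (fun s => (p.1, s)))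

-- ===== PRECONDITION & SPEC =====
-- Pre_ excludes units containing a box absent from values: Python A raises KeyError there,
-- except when only the last box is missing and no earlier box has a 2-candidate value, where A
-- returns [] without ever looking it up while B raises (see claim cites).
def Pre_find_twins (unit : List String) (values : List (String × String)) : Prop :=
  ∀ b ∈ unit, ((PySem.Dict.mk values).get? b).isSome
instance (unit : List String) (values : List (String × String)) : Decidable (Pre_find_twins unit values) := by unfold Pre_find_twins; infer_instance

def pvWitness_find_twins : List String × (List (String × String)) :=
  (["A1", "A2", "A3"], [("A1", "23"), ("A2", "14"), ("A3", "23")])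

def Spec_find_twins (unit : List String) (values : List (String × String)) (out : List (String × String)) : Prop := out = find_twins_alt unit values
instance (unit : List String) (values : List (String × String)) (out : List (String × String)) : Decidable (Spec_find_twins unit values out) := by unfold Spec_find_twins; infer_instance

-- ===== CLAIM (what is proved, stated in full; the proofs are below) =====
def Claim_equal_find_twins : Prop := ∀ (unit : List String) (values : List (String × String)), Dom_find_twins unit values → Pre_find_twins unit values → Spec_find_twins unit values (find_twins unit values)

-- ===== LEMMAS AND PROOFS =====

lemma altFold_cons (d : PySem.Dict String String) (b : String) (l : List String) :
    altFold d (b :: l) =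
      (if PySem.Str.len (d.getD b "") = 2 then
        ((altFold d l).1.insert (d.getD b "") b,
          (b, (altFold d l).1.get? (d.getD b "")) :: (altFold d l).2)
      else ((altFold d l).1, (b, none) :: (altFold d l).2)) := rfl

-- the dict built by the backward pass answers exactly A's inner scan:
-- looking up v in the dict built from `rest` yields the first element of `rest` whose value equals v
lemma altFold_get? (d : PySem.Dict String String) (rest : List String) (v : String)
    (hv : PySem.Str.len v = 2) :
    (altFold d rest).1.get? v = (rest.filter (fun t => d.getD t "" == v)).head? := by
  induction rest with
  | nil => simp [altFold, PySem.Dict.get?_empty]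
  | cons t rs ih =>
    rw [altFold_cons]
    by_cases heq : d.getD t "" = v
    · have hlen : PySem.Str.len (d.getD t "") = 2 := by rw [heq]; exact hv
      rw [if_pos hlen]
      simp [heq, PySem.Dict.get?_insert_self]
    · have hbeq : (d.getD t "" == v) = false := by simpa using heq
      by_cases hlen : PySem.Str.len (d.getD t "") = 2
      · rw [if_pos hlen]
        simp only [List.filter_cons, hbeq, Bool.false_eq_true, if_false,
          PySem.Dict.get?_insert_of_ne _ _ (Ne.symm heq), ih]
      · rw [if_neg hlen]
        simp only [List.filter_cons, hbeq, Bool.false_eq_true, if_false, ih]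

lemma go_eq_alt (d : PySem.Dict String String) (l : List String) :
    findTwinsGo d l =
      (altFold d l).2.filterMap (fun p => p.2.map (fun s => (p.1, s))) := by
  induction l with
  | nil => simp [findTwinsGo, altFold]
  | cons box rest ih =>
    rw [altFold_cons]
    by_cases hv : PySem.Str.len (d.getD box "") = 2
    · rw [if_pos hv]
      cases rest with
      | nil =>
        simp [findTwinsGo, altFold, PySem.Dict.get?_empty]
      | cons r rs =>
        have hget := altFold_get? d (r :: rs) (d.getD box "") hv
        have hgo : findTwinsGo d (box :: r :: rs) =
            (if PySem.Str.len (d.getD box "") = 2 then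
              match (r :: rs).filter (fun t => d.getD t "" == d.getD box "") with
              | [] => findTwinsGo d (r :: rs)
              | t :: _ => (box, t) :: findTwinsGo d (r :: rs)
            else findTwinsGo d (r :: rs)) := rfl
        rw [hgo, if_pos hv]
        rw [List.filterMap_cons]
        rw [hget]
        cases hfil : (r :: rs).filter (fun t => d.getD t "" == d.getD box "") with
        | nil => simp [ih]
        | cons t ts => simp [ih]
    · rw [if_neg hv]
      cases rest with
      | nil => simp [findTwinsGo, altFold]
      | cons r rs =>
        have hgo : findTwinsGo d (box :: r :: rs) =
            (if PySem.Str.len (d.getD box "") = 2 then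
              match (r :: rs).filter (fun t => d.getD t "" == d.getD box "") with
              | [] => findTwinsGo d (r :: rs)
              | t :: _ => (box, t) :: findTwinsGo d (r :: rs)
            else findTwinsGo d (r :: rs)) := rfl
        rw [hgo, if_neg hv, List.filterMap_cons]
        simp [ih]

-- ===== VERDICT (by name: the statement is the Claim_ definition above) =====
theorem find_twins_spec : Claim_equal_find_twins := by
  intro unit values _ _
  unfold Spec_find_twins find_twins find_twins_alt
  exact go_eq_alt _ _
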